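-- pv_equiv track=rewrite | github.com/Ace1928/eidosian_forge | archive_forge/code/func_sum_dicts.py | sum_dicts
-- ===== SOURCE A (Python) =====
-- def sum_dicts(dicts):
--     """Sums the dictionaries entrywise.
--
--     Parameters
--     ----------
--     dicts : list
--         A list of dictionaries with numeric entries.
--
--     Returns
--     -------
--     dict
--         A dict with the sum.
--     """
--     sum_dict = {}
--     for val_dict in dicts:
--         for id_, value in val_dict.items():
--             if id_ in sum_dict:
--                 sum_dict[id_] = sum_dict[id_] + value
--             else:
--                 sum_dict[id_] = value
--     return sum_dict
-- ===== SOURCE B (Python) =====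
-- def sum_dicts(dicts):
--     """Sums the dictionaries entrywise.
--
--     Group-then-reduce: first collect every key's values in appearance order,
--     then reduce each group seeded with its first value.
--     """
--     groups = {}
--     for val_dict in dicts:
--         for id_, value in val_dict.items():
--             groups.setdefault(id_, []).append(value)
--     result = {}
--     for id_, values in groups.items():
--         total = values[0]
--         for v in values[1:]:
--             total = total + v
--         result[id_] = total
--     return result
-- ===== Notes on version B (the rewrite author's own statement) =====
-- stated objective: alternative
-- what changed: B groups each key's values into per-key lists in one pass (dict.setdefault(...).append) and then reduces every group seeded with its first value, instead of A's single sweep that keeps running totals in the result dict.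
import Mathlib
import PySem

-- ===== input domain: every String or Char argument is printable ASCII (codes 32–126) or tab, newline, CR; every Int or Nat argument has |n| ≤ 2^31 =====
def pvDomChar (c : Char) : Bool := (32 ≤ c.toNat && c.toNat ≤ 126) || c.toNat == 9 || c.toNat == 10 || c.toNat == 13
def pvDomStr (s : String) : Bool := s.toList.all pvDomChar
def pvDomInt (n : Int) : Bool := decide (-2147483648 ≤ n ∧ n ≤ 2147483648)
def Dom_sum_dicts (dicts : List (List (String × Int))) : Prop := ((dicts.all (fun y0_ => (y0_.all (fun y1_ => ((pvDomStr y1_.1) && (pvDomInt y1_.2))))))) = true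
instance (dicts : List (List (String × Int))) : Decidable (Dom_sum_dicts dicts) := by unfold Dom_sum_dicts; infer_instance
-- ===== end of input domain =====

-- B groups each key's values in one pass and then reduces every group (seeded with its
-- first value), instead of A's single sweep that keeps running totals (objective: alternative).

-- ===== PORT A =====
-- one step of A's inner loop: 'if id_ in sum_dict: … + value else: … = value'
def aStep (sd : PySem.Dict String Int) (p : String × Int) : PySem.Dict String Int :=
  if sd.contains p.1 then sd.insert p.1 (sd.getD p.1 0 + p.2) else sd.insert p.1 p.2

def sum_dicts (dicts : List (List (String × Int))) : List (String × Int) :=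
  (dicts.foldl (fun sd val_dict => val_dict.foldl aStep sd) PySem.Dict.empty).items

-- ===== PORT B =====
-- 'groups.setdefault(id_, []).append(value)'  =  groups[id_] = groups.get(id_, []) + [value]
def bGroup (dicts : List (List (String × Int))) : PySem.Dict String (List Int) :=
  dicts.foldl
    (fun g val_dict => val_dict.foldl (fun g p => g.modify p.1 [] (fun vs => vs ++ [p.2])) g)
    PySem.Dict.empty

-- 'total = values[0]; for v in values[1:]: total = total + v'
-- (every group is nonempty in B, so the [] branch is unreachable; 0 only for totality)
def bReduce (values : List Int) : Int :=
  match values with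
  | [] => 0
  | v0 :: rest => rest.foldl (· + ·) v0

def sum_dicts_alt (dicts : List (List (String × Int))) : List (String × Int) :=
  (bGroup dicts).items.map (fun kv => (kv.1, bReduce kv.2))

-- ===== PRECONDITION & SPEC =====
def Spec_sum_dicts (dicts : List (List (String × Int))) (out : List (String × Int)) : Prop := out = sum_dicts_alt dicts
instance (dicts : List (List (String × Int))) (out : List (String × Int)) : Decidable (Spec_sum_dicts dicts out) := by unfold Spec_sum_dicts; infer_instance

-- ===== CLAIM (what is proved, stated in full; the proofs are below) =====
def Claim_equal_sum_dicts : Prop := ∀ (dicts : List (List (String × Int))), Dom_sum_dicts dicts → Spec_sum_dicts dicts (sum_dicts dicts)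

-- ===== LEMMAS AND PROOFS =====

-- the common canonical form: first-appearance keys, each with the sum of all its values
def canonical (ps : List (String × Int)) : List (String × Int) :=
  (PySem.List.dedup (ps.map Prod.fst)).map
    (fun k => (k, ((ps.filter (fun p => p.1 == k)).map Prod.snd).sum))

-- dedup over a snoc: drop the new element iff it occurred before
theorem dedup_snoc (xs : List String) (x : String) :
    PySem.List.dedup (xs ++ [x]) = if x ∈ xs then PySem.List.dedup xs else PySem.List.dedup xs ++ [x] := by
  have h : List.foldl PySem.Set.add PySem.Set.empty xs = PySem.List.dedup xs := by
    simp [PySem.List.dedup_eq_ofList, PySem.Set.ofList]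
  simp only [PySem.List.dedup_eq_ofList, PySem.Set.ofList, List.foldl_append, List.foldl_cons,
    List.foldl_nil, PySem.Set.add]
  rw [h]
  by_cases hx : x ∈ xs <;> simp [hx, List.contains_eq_mem]

theorem aFold_items (ps : List (String × Int)) :
    (ps.foldl aStep PySem.Dict.empty).items = canonical ps := by
  induction ps using List.reverseRecOn with
  | nil => decide
  | append_singleton ps p ih =>
    rw [List.foldl_append, List.foldl_cons, List.foldl_nil]
    set D := ps.foldl aStep PySem.Dict.empty with hD
    have hkeys : D.keys = PySem.List.dedup (ps.map Prod.fst) := by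
      simp [PySem.Dict.keys, ih, canonical, List.map_map, Function.comp_def]
    have hnodup : D.keys.Nodup := hkeys ▸ PySem.List.nodup_dedup _
    have hmapfst : (ps ++ [p]).map Prod.fst = ps.map Prod.fst ++ [p.1] := by simp
    unfold aStep
    by_cases hk : p.1 ∈ ps.map Prod.fst
    · have hcont : D.contains p.1 = true := by
        rw [PySem.Dict.contains_eq_decide_mem_keys, hkeys]
        simp [hk]
      have hmem : (p.1, ((ps.filter (fun q => q.1 == p.1)).map Prod.snd).sum) ∈ D.items := by
        rw [ih]
        exact List.mem_map_of_mem ((PySem.List.mem_dedup _ _).mpr hk)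
      have hget : D.getD p.1 0 = ((ps.filter (fun q => q.1 == p.1)).map Prod.snd).sum :=
        PySem.Dict.getD_of_mem_items _ hmem hnodup 0
      rw [hcont, if_pos rfl, PySem.Dict.items_insert_of_contains _ _ hcont, ih, hget]
      unfold canonical
      rw [hmapfst, dedup_snoc, if_pos hk, List.map_map]
      refine List.map_congr_left ?_
      intro k hkmem
      by_cases hkk : k = p.1
      · subst hkk
        simp [List.filter_append, List.sum_append]
      · have : (k == p.1) = false := by simp [hkk]
        simp [List.filter_append, Ne.symm hkk]
        exact hkk
    · have hcont : D.contains p.1 = false := by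
        rw [PySem.Dict.contains_eq_decide_mem_keys, hkeys]
        simp [hk]
      have hfil : ps.filter (fun q => q.1 == p.1) = [] := by
        rw [List.filter_eq_nil_iff]
        intro q hq
        simp only [beq_iff_eq]
        exact fun h => hk (h ▸ List.mem_map_of_mem hq)
      rw [hcont]
      simp only [Bool.false_eq_true, if_false]
      rw [PySem.Dict.items_insert_of_not_contains _ _ hcont, ih]
      unfold canonical
      rw [hmapfst, dedup_snoc, if_neg hk, List.map_append]
      congr 1
      · refine List.map_congr_left ?_
        intro k hkmem
        have hne : k ≠ p.1 := fun h => hk (h ▸ (PySem.List.mem_dedup _ _).mp hkmem)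
        have : (p.1 == k) = false := by simp [Ne.symm hne]
        simp [List.filter_append, this]
      · simp [List.filter_append, hfil]

theorem bReduce_eq_sum (values : List Int) : bReduce values = values.sum := by
  cases values with
  | nil => rfl
  | cons v0 rest =>
    show rest.foldl (· + ·) v0 = _
    rw [show (fun (acc x : Int) => acc + x) = (fun (acc : Int) (x : Int) => acc + id x) from rfl,
      PySem.List.foldl_add]
    simp

-- ===== VERDICT (by name: the statement is the Claim_ definition above) =====
theorem sum_dicts_spec : Claim_equal_sum_dicts := by
  intro dicts _
  unfold Spec_sum_dicts sum_dicts sum_dicts_alt bGroup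
  rw [← List.foldl_flatten, ← List.foldl_flatten, aFold_items]
  set ps := dicts.flatten with hps
  have hkeys : (ps.foldl (fun g p => g.modify p.1 [] (fun vs => vs ++ [p.2])) PySem.Dict.empty).keys
      = PySem.List.dedup (ps.map Prod.fst) := by
    rw [PySem.Dict.keys_foldl_modify_key ps Prod.fst [] (fun _ p vs => vs ++ [p.2]) PySem.Dict.empty]
    simp [PySem.Set.update, PySem.List.dedup_eq_ofList, PySem.Set.ofList, PySem.Set.empty,
      PySem.Dict.keys_empty]
  have hnodup : (ps.foldl (fun g p => g.modify p.1 [] (fun vs => vs ++ [p.2])) PySem.Dict.empty).keys.Nodup :=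
    PySem.Dict.nodup_keys_foldl_modify_key ps Prod.fst [] (fun _ p vs => vs ++ [p.2])
      PySem.Dict.empty (by simp)
  rw [PySem.Dict.items_eq_map_keys _ hnodup [], List.map_map, hkeys]
  unfold canonical
  refine (List.map_congr_left ?_).symm
  intro k hkmem
  simp only [Function.comp_def]
  rw [PySem.Dict.getD_foldl_modify_append ps PySem.Dict.empty k, bReduce_eq_sum]
  simp [PySem.Dict.getD_empty]
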